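-- pv_equiv track=rewrite | github.com/madrury/advent-of-code-2023 | day14/solution-pt1.py | roll_up
-- ===== SOURCE A (Python) =====
-- from typing import List, Tuple, Optional
--
-- FinalPositions = List[int]
--
-- ROUND = 'O'
--
-- CUBE = '#'
--
-- def roll_up(row: List[str]) -> FinalPositions:
--     most_recent_cube_idx: int = 0
--     number_of_round_seen: int = 0
--     final_positions: FinalPositions = []
--     for idx, ch in enumerate(row):
--         if ch == ROUND:
--             number_of_round_seen += 1
--         if ch == CUBE:
--             final_positions.extend(
--                 range(most_recent_cube_idx, most_recent_cube_idx + number_of_round_seen)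
--             )
--             most_recent_cube_idx = idx + 1
--             number_of_round_seen = 0
--     final_positions.extend(
--         range(most_recent_cube_idx, most_recent_cube_idx + number_of_round_seen)
--     )
--     return final_positions
-- ===== SOURCE B (Python) =====
-- from typing import List
--
-- FinalPositions = List[int]
--
-- ROUND = 'O'
-- CUBE = '#'
--
-- def roll_up(row: List[str]) -> FinalPositions:
--     # Recursive split on cubes: emit the rest positions of the first
--     # cube-free segment, then recurse on the remainder after the cube.
--     def go(rest: List[str], base: int) -> FinalPositions:
--         if CUBE not in rest:
--             return list(range(base, base + rest.count(ROUND)))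
--         k = rest.index(CUBE)
--         return list(range(base, base + rest[:k].count(ROUND))) + go(rest[k + 1:], base + k + 1)
--     return go(row, 0)
-- ===== Notes on version B (the rewrite author's own statement) =====
-- stated objective: alternative
-- what changed: A is a single fold carrying (last-cube-index, rounds-seen, output) and flushing at each cube; B is a recursive divide-at-first-cube: find the first '#', emit range(base, base + count of 'O' before it), and recurse on the slice after it.
import Mathlib
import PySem

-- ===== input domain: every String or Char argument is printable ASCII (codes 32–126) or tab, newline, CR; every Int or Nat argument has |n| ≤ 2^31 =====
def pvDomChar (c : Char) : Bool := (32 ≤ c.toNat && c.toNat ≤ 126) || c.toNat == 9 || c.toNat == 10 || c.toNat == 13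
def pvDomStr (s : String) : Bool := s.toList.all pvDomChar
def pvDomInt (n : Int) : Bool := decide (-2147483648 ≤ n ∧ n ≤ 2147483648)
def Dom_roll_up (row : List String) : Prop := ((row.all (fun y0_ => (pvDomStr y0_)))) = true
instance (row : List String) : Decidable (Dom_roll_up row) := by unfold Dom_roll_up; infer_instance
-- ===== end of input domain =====

-- B replaces A's single fold (flush-at-cube accumulator) with a recursive
-- divide-at-first-cube decomposition; same asymptotic cost, alternative structure.


-- ===== PORT A =====
-- one fold over enumerate(row) carrying (most_recent_cube_idx, number_of_round_seen, final_positions)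
def rollStepA (s : Int × Int × List Int) (p : Int × String) : Int × Int × List Int :=
  let s1 := if p.2 = "O" then (s.1, s.2.1 + 1, s.2.2) else s
  if p.2 = "#" then (p.1 + 1, 0, s1.2.2 ++ PySem.List.pyRange s1.1 (s1.1 + s1.2.1) 1) else s1

def roll_up (row : List String) : List Int :=
  let st := (PySem.List.enumerate row 0).foldl rollStepA (0, 0, [])
  st.2.2 ++ PySem.List.pyRange st.1 (st.1 + st.2.1) 1

-- ===== PORT B =====
-- recursive split at the first cube ('#' ∉ rest ↔ index? = none)
def rollGo (rest : List String) (base : Int) : List Int :=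
  match h : PySem.List.index? rest "#" with
  | none => PySem.List.pyRange base (base + (PySem.List.count rest "O" : Int)) 1
  | some k =>
      PySem.List.pyRange base (base + (PySem.List.count (PySem.List.slice rest none (some (k : Int))) "O" : Int)) 1
        ++ rollGo (PySem.List.slice rest (some ((k : Int) + 1)) none) (base + (k : Int) + 1)
termination_by rest.length
decreasing_by
  have hmem : "#" ∈ rest :=
    (PySem.List.index?_isSome_iff rest "#").mp (by rw [h]; rfl)
  have hne : rest ≠ [] := by rintro rfl; simp at hmem
  rw [PySem.List.slice_from rest (by omega : (0:Int) ≤ (k : Int) + 1)]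
  have : ((k : Int) + 1).toNat = k + 1 := by omega
  rw [this]
  have : 0 < rest.length := List.length_pos_iff.mpr hne
  simp [List.length_drop]; omega

def roll_up_alt (row : List String) : List Int := rollGo row 0

-- ===== PRECONDITION & SPEC =====
def Spec_roll_up (row : List String) (out : List Int) : Prop := out = roll_up_alt row
instance (row : List String) (out : List Int) : Decidable (Spec_roll_up row out) := by unfold Spec_roll_up; infer_instance

-- ===== CLAIM (what is proved, stated in full; the proofs are below) =====
def Claim_equal_roll_up : Prop := ∀ (row : List String), Dom_roll_up row → Spec_roll_up row (roll_up row)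

-- ===== LEMMAS AND PROOFS =====

-- A's loop result, restructured recursively over the remaining row (proof-only helper)
def goAux : List String → Int → Int → Int → List Int
  | [], _, m, n => PySem.List.pyRange m (m + n) 1
  | c :: cs, idx, m, n =>
      if c = "#" then PySem.List.pyRange m (m + n) 1 ++ goAux cs (idx + 1) (idx + 1) 0
      else goAux cs (idx + 1) m (n + if c = "O" then 1 else 0)

def finishA (s : Int × Int × List Int) : List Int :=
  s.2.2 ++ PySem.List.pyRange s.1 (s.1 + s.2.1) 1

theorem foldA_eq_goAux (rest : List String) :
    ∀ (idx m n : Int) (fp : List Int),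
      finishA ((PySem.List.enumerate rest idx).foldl rollStepA (m, n, fp)) =
        fp ++ goAux rest idx m n := by
  induction rest with
  | nil => intro idx m n fp; simp [PySem.List.enumerate, finishA, goAux]
  | cons c cs ih =>
      intro idx m n fp
      rw [PySem.List.enumerate_cons, List.foldl_cons]
      by_cases hc : c = "#"
      · subst hc
        have hcO : ¬ ("#" : String) = "O" := by decide
        rw [show rollStepA (m, n, fp) (idx, "#")
              = (idx + 1, 0, fp ++ PySem.List.pyRange m (m + n) 1) from by
            simp [rollStepA, hcO]]
        rw [ih]
        simp [goAux]
      · by_cases hO : c = "O"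
        · subst hO
          rw [show rollStepA (m, n, fp) (idx, "O") = (m, n + 1, fp) from by
              simp [rollStepA, hc]]
          rw [ih]
          simp [goAux, hc]
        · rw [show rollStepA (m, n, fp) (idx, c) = (m, n, fp) from by
              simp [rollStepA, hc, hO]]
          rw [ih]
          simp [goAux, hc, hO]

theorem goAux_split (rest : List String) :
    ∀ (idx m n : Int),
      goAux rest idx m n =
        match PySem.List.index? rest "#" with
        | none => PySem.List.pyRange m (m + n + (PySem.List.count rest "O" : Int)) 1
        | some k =>
            PySem.List.pyRange m (m + n + (PySem.List.count (rest.take k) "O" : Int)) 1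
              ++ goAux (rest.drop (k + 1)) (idx + (k : Int) + 1) (idx + (k : Int) + 1) 0 := by
  induction rest with
  | nil => intro idx m n; simp [goAux, PySem.List.index?, PySem.List.count]
  | cons c cs ih =>
      intro idx m n
      by_cases hc : c = "#"
      · subst hc
        rw [PySem.List.index?_cons_self]
        simp [goAux, PySem.List.count]
      · rw [goAux, if_neg hc, ih, PySem.List.index?_cons_of_ne cs hc]
        by_cases hO : c = "O"
        · subst hO
          cases hk : PySem.List.index? cs "#" with
          | none =>
              simp [PySem.List.count, Option.map]
              ring_nf
          | some k =>
              simp [PySem.List.count, Option.map]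
              ring_nf
        · cases hk : PySem.List.index? cs "#" with
          | none =>
              simp [PySem.List.count, Option.map, hO]
          | some k =>
              simp [PySem.List.count, Option.map, hO]
              ring_nf

theorem goAux_eq_rollGo (rest : List String) (b : Int) :
    goAux rest b b 0 = rollGo rest b := by
  induction hL : rest.length using Nat.strong_induction_on generalizing rest b with
  | _ L ih =>
      rw [goAux_split, rollGo]
      cases hk : PySem.List.index? rest "#" with
      | none => simp
      | some k =>
          have hmem : "#" ∈ rest :=
            (PySem.List.index?_isSome_iff rest "#").mp (by rw [hk]; rfl)
          have hpos : 0 < rest.length := List.length_pos_iff.mpr (by rintro rfl; simp at hmem)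
          have h1 := PySem.List.slice_to rest (show (0:Int) ≤ (k : Int) by omega)
          have h2 := PySem.List.slice_from rest (show (0:Int) ≤ (k : Int) + 1 by omega)
          have e1 : ((k : Int)).toNat = k := by omega
          have e2 : ((k : Int) + 1).toNat = k + 1 := by omega
          rw [e1] at h1; rw [e2] at h2
          simp only [h1, h2, add_zero]
          congr 1
          subst hL
          exact ih (rest.drop (k + 1)).length (by simp [List.length_drop]; omega) _ _ rfl

-- ===== VERDICT (by name: the statement is the Claim_ definition above) =====
theorem roll_up_spec : Claim_equal_roll_up := by
  intro row _
  show roll_up row = roll_up_alt row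
  have h := foldA_eq_goAux row 0 0 0 []
  simp only [finishA] at h
  simpa [roll_up, roll_up_alt, h] using (goAux_eq_rollGo row 0)
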